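-- pv_equiv track=rewrite | github.com/KomendaKacper/Algorithms-from-college | Algorithms and Data Structures/Rabin-Karp_Bloom.py | might_be_in_bloom
-- ===== SOURCE A (Python) =====
-- def hash1(pattern, b):
--     return sum(ord(char) for char in pattern) % b
--
-- def hash2(pattern, b):
--     return sum((i + 1) * ord(char) for i, char in enumerate(pattern)) % b
--
-- def might_be_in_bloom(substring, bloom_filter, b, k):
--     for i in range(k):
--         if i % 2 == 0:
--             digest = hash1(substring, b)
--         else:
--             digest = hash2(substring, b)
--         if not bloom_filter[digest]:
--             return False
--     return True
-- ===== SOURCE B (Python) =====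
-- def hash1(pattern, b):
--     return sum(ord(char) for char in pattern) % b
--
-- def hash2(pattern, b):
--     return sum((i + 1) * ord(char) for i, char in enumerate(pattern)) % b
--
-- def might_be_in_bloom(substring, bloom_filter, b, k):
--     # Only two distinct hashes ever occur; compute each at most once instead of looping k times.
--     if k <= 0:
--         return True
--     if not bloom_filter[hash1(substring, b)]:
--         return False
--     if k <= 1:
--         return True
--     return bloom_filter[hash2(substring, b)]
-- ===== Notes on version B (the rewrite author's own statement) =====
-- stated objective: simpler
-- what changed: A re-hashes the whole substring on every one of the k loop iterations although only two distinct hashes exist; B drops the loop and computes hash1 (and, only if k>=2, hash2) exactly once, testing the two bloom bits directly.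
import Mathlib
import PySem

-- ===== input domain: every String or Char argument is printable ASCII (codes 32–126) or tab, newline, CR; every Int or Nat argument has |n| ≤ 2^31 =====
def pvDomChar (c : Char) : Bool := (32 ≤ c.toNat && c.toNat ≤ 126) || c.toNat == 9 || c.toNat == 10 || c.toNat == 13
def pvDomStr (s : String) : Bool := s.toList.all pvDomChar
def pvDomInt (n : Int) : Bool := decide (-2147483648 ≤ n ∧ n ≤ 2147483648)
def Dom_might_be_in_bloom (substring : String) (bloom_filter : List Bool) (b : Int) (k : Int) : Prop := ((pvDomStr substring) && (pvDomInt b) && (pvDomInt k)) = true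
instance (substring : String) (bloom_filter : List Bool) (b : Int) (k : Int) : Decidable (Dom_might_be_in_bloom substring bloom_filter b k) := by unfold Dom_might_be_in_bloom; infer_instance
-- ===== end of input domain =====

-- B replaces A's k-iteration loop by computing each of the two distinct parity-hashes at most once and testing the two bloom bits directly (simpler).


-- ===== PORT A =====
-- hash1(pattern, b) = sum(ord(char) for char in pattern) % b
def pvHash1 (pattern : String) (b : Int) : Int :=
  PySem.Int.mod ((pattern.toList.map (fun c => (c.toNat : Int))).sum) b

-- hash2(pattern, b) = sum((i+1)*ord(char) for i, char in enumerate(pattern)) % b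
def pvHash2 (pattern : String) (b : Int) : Int :=
  PySem.Int.mod (((PySem.List.enumerate pattern.toList 0).map (fun p => (p.1 + 1) * (p.2.toNat : Int))).sum) b

-- the 'for i in range(k)' loop with its early return; out-of-range index (IndexError,
-- excluded by Pre_) is rendered as .getD false
def pvLoopA (substring : String) (bloom_filter : List Bool) (b : Int) : List Int → Bool
  | [] => true
  | i :: rest =>
    let digest := if PySem.Int.mod i 2 = 0 then pvHash1 substring b else pvHash2 substring b
    if (PySem.List.pyGet? bloom_filter digest).getD false then
      pvLoopA substring bloom_filter b rest
    else
      false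

def might_be_in_bloom (substring : String) (bloom_filter : List Bool) (b : Int) (k : Int) : Bool :=
  pvLoopA substring bloom_filter b (PySem.List.pyRange 0 k 1)

-- ===== PORT B =====
def might_be_in_bloom_alt (substring : String) (bloom_filter : List Bool) (b : Int) (k : Int) : Bool :=
  if k ≤ 0 then true
  else if ¬ (PySem.List.pyGet? bloom_filter (pvHash1 substring b)).getD false then false
  else if k ≤ 1 then true
  else (PySem.List.pyGet? bloom_filter (pvHash2 substring b)).getD false

-- ===== PRECONDITION & SPEC =====
-- Pre_ is exactly where the Python A returns normally: either the loop is empty (k ≤ 0), or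
-- b ≠ 0 (no ZeroDivisionError) and every bloom_filter index A actually reaches is in Python's
-- (negative-index-aware) range: hash1's always, hash2's only when the loop gets past i = 0.
def Pre_might_be_in_bloom (substring : String) (bloom_filter : List Bool) (b : Int) (k : Int) : Prop :=
  k ≤ 0 ∨ (b ≠ 0 ∧ (PySem.List.pyGet? bloom_filter (pvHash1 substring b)).isSome ∧
    (PySem.List.pyGet? bloom_filter (pvHash1 substring b) = some false ∨ k ≤ 1 ∨
      (PySem.List.pyGet? bloom_filter (pvHash2 substring b)).isSome))
instance (substring : String) (bloom_filter : List Bool) (b : Int) (k : Int) : Decidable (Pre_might_be_in_bloom substring bloom_filter b k) := by unfold Pre_might_be_in_bloom; infer_instance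

def pvWitness_might_be_in_bloom : String × List Bool × Int × Int := ("a", [true, true], 2, 2)

def Spec_might_be_in_bloom (substring : String) (bloom_filter : List Bool) (b : Int) (k : Int) (out : Bool) : Prop := out = might_be_in_bloom_alt substring bloom_filter b k
instance (substring : String) (bloom_filter : List Bool) (b : Int) (k : Int) (out : Bool) : Decidable (Spec_might_be_in_bloom substring bloom_filter b k out) := by unfold Spec_might_be_in_bloom; infer_instance

-- ===== CLAIM (what is proved, stated in full; the proofs are below) =====
def Claim_equal_might_be_in_bloom : Prop := ∀ (substring : String) (bloom_filter : List Bool) (b : Int) (k : Int), Dom_might_be_in_bloom substring bloom_filter b k → Pre_might_be_in_bloom substring bloom_filter b k → Spec_might_be_in_bloom substring bloom_filter b k (might_be_in_bloom substring bloom_filter b k)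

-- ===== LEMMAS AND PROOFS =====
-- if both bloom bits are set, the loop returns true on any index list
lemma pvLoopA_true (substring : String) (bloom_filter : List Bool) (b : Int)
    (h1 : (PySem.List.pyGet? bloom_filter (pvHash1 substring b)).getD false = true)
    (h2 : (PySem.List.pyGet? bloom_filter (pvHash2 substring b)).getD false = true) :
    ∀ l : List Int, pvLoopA substring bloom_filter b l = true := by
  intro l
  induction l with
  | nil => rfl
  | cons i rest ih =>
    by_cases hp : (2:Int) ∣ i <;>
      simp [pvLoopA, hp, h1, h2, ih]

theorem might_be_in_bloom_spec' (substring : String) (bloom_filter : List Bool) (b : Int) (k : Int) :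
    might_be_in_bloom substring bloom_filter b k = might_be_in_bloom_alt substring bloom_filter b k := by
  unfold might_be_in_bloom might_be_in_bloom_alt
  by_cases hk : k ≤ 0
  · rw [PySem.List.pyRange_one_eq_nil hk]
    simp [pvLoopA, hk]
  · push Not at hk
    rw [PySem.List.pyRange_one_cons hk]
    by_cases h1 : (PySem.List.pyGet? bloom_filter (pvHash1 substring b)).getD false = true
    · by_cases hk1 : k ≤ 1
      · have : k = 1 := by omega
        subst this
        rw [PySem.List.pyRange_one_eq_nil (by norm_num)]
        simp [pvLoopA, h1]
      · push Not at hk1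
        rw [PySem.List.pyRange_one_cons (by omega : (0:Int) + 1 < k)]
        by_cases h2 : (PySem.List.pyGet? bloom_filter (pvHash2 substring b)).getD false = true
        · rw [pvLoopA_true substring bloom_filter b h1 h2]
          simp [h1, h2]
        · simp only [pvLoopA]
          simp [h1]
          simp at h2
          simp [h2]
          omega
    · simp at h1
      simp only [pvLoopA]
      simp [h1, hk]

-- ===== VERDICT (by name: the statement is the Claim_ definition above) =====
theorem might_be_in_bloom_spec : Claim_equal_might_be_in_bloom := by
  intro substring bloom_filter b k _ _
  unfold Spec_might_be_in_bloom
  exact might_be_in_bloom_spec' substring bloom_filter b k
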